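-- pv_equiv track=rewrite | github.com/onigaandreea/collage-stuff | sem5/LFTC/lab1/analizator.py | extrage_cuvinte
-- ===== SOURCE A (Python) =====
-- def extrage_cuvinte(text, separatori):
--     cuvinte = []
--     cuvant_curent = ""
--     in_ghilimele = False
--
--     for caracter in text:
--         if caracter == '"':
--             in_ghilimele = not in_ghilimele  # Invertim starea la fiecare ghilimea
--         elif not in_ghilimele and caracter not in separatori and caracter != '\n':
--             cuvant_curent += caracter
--         else:
--             if cuvant_curent:
--                 cuvinte.append(cuvant_curent)
--             cuvant_curent = ""
--
--     if cuvant_curent: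
--         cuvinte.append(cuvant_curent)
--
--     cuv_unice = []
--     [cuv_unice.append(x) for x in cuvinte if x not in cuv_unice]
--
--     return cuv_unice
-- ===== SOURCE B (Python) =====
-- def extrage_cuvinte(text, separatori):
--     # Split on '"': parts at even indices are outside quotes, odd indices inside.
--     parts = text.split('"')
--     chunks = []
--     for i, p in enumerate(parts):
--         if i % 2 == 0:
--             chunks.append(p)
--         elif p:
--             # a nonempty quoted segment breaks the surrounding word; '""' does not
--             chunks.append('\n')
--     s = ''.join(chunks)
--     table = {ord(c): '\n' for c in separatori}
--     tokens = s.translate(table).split('\n')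
--     seen = set()
--     unice = []
--     for t in tokens:
--         if t and t not in seen:
--             seen.add(t)
--             unice.append(t)
--     return unice
-- ===== Notes on version B (the rewrite author's own statement) =====
-- stated objective: alternative
-- what changed: Replaces A's character-by-character quote state machine (toggle flag, per-char append/flush) by a split-on-'"' decomposition: even parts of text.split('"') are outside quotes and are joined with a '\n' break wherever the quoted segment between them was nonempty, then one translate+split pass tokenizes and a seen-set dedups instead of A's per-word 'x not in list' scan.
import Mathlib
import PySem

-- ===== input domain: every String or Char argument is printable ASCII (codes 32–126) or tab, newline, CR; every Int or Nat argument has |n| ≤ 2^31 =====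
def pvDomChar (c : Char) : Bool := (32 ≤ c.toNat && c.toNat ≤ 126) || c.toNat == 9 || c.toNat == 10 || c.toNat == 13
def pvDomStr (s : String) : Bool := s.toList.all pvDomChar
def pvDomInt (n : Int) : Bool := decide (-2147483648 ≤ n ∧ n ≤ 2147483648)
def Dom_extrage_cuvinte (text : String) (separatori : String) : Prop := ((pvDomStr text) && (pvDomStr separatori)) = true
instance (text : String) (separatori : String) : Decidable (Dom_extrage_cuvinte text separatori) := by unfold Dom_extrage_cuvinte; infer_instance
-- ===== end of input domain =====

-- B replaces A's char-by-char quote state machine by a split-on-'"' decomposition and its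
-- 'x not in list' dedup by a seen-set (objective: alternative algorithm, same return value).

-- ===== PORT A =====
-- A's FSM loop: state = (cuvinte, cuvant_curent, in_ghilimele); words kept as List Char.
def pvALoop (seps : List Char) : (List (List Char) × List Char × Bool) → List Char → (List (List Char) × List Char × Bool)
  | st, [] => st
  | (cuv, cur, q), c :: rest =>
    if c = '"' then pvALoop seps (cuv, cur, !q) rest
    else if ¬ q ∧ c ∉ seps ∧ c ≠ '\n' then pvALoop seps (cuv, cur ++ [c], q) rest
    else pvALoop seps ((if cur ≠ [] then cuv ++ [cur] else cuv), [], q) rest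

def extrage_cuvinte (text : String) (separatori : String) : List String :=
  let st := pvALoop separatori.toList ([], [], false) text.toList
  let cuvinte := if st.2.1 ≠ [] then st.1 ++ [st.2.1] else st.1
  -- `[cuv_unice.append(x) for x in cuvinte if x not in cuv_unice]`
  (cuvinte.foldl (fun acc x => if x ∈ acc then acc else acc ++ [x]) []).map String.ofList

-- ===== PORT B =====
-- Source B's chunks loop: even-indexed parts (flag = true) are kept, a nonempty odd part becomes '\n'.
def pvBChunks : List (List Char) → Bool → List Char
  | [], _ => []
  | p :: rest, true => p ++ pvBChunks rest false
  | p :: rest, false => (if p ≠ [] then ['\n'] else []) ++ pvBChunks rest true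

-- Source B's dedup loop: `if t and t not in seen: seen.add(t); unice.append(t)`.
def pvBDedup : List (List Char) → PySem.Set (List Char) → List (List Char) → List (List Char)
  | [], _, out => out
  | t :: ts, seen, out =>
    if t ≠ [] ∧ PySem.Set.contains seen t = false then pvBDedup ts (PySem.Set.add seen t) (out ++ [t])
    else pvBDedup ts seen out

def extrage_cuvinte_alt (text : String) (separatori : String) : List String :=
  let parts := text.toList.splitOn '"'          -- text.split('"')
  let s := pvBChunks parts true                 -- ''.join(chunks)
  let t := s.map (fun c => if c ∈ separatori.toList then '\n' else c)  -- s.translate(table)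
  let toks := t.splitOn '\n'                    -- .split('\n')
  (pvBDedup toks PySem.Set.empty []).map String.ofList

-- ===== PRECONDITION & SPEC =====
def Spec_extrage_cuvinte (text : String) (separatori : String) (out : List String) : Prop := out = extrage_cuvinte_alt text separatori
instance (text : String) (separatori : String) (out : List String) : Decidable (Spec_extrage_cuvinte text separatori out) := by unfold Spec_extrage_cuvinte; infer_instance

-- ===== CLAIM (what is proved, stated in full; the proofs are below) =====
def Claim_equal_extrage_cuvinte : Prop := ∀ (text : String) (separatori : String), Dom_extrage_cuvinte text separatori → Spec_extrage_cuvinte text separatori (extrage_cuvinte text separatori)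

-- ===== LEMMAS AND PROOFS =====

-- Event stream of A's FSM: `some c` = c is appended to the current word, `none` = word break;
-- '"' characters produce no event (they only toggle the state).
def pvEv (seps : List Char) : List Char → Bool → List (Option Char)
  | [], _ => []
  | c :: t, q =>
    if c = '"' then pvEv seps t (!q)
    else if q then none :: pvEv seps t true
    else (if c ∈ seps ∨ c = '\n' then none else some c) :: pvEv seps t false

-- Words produced from an event stream, given the word accumulated so far.
def pvWords : List Char → List (Option Char) → List (List Char)
  | cur, [] => if cur = [] then [] else [cur]
  | cur, some c :: es => pvWords (cur ++ [c]) es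
  | cur, none :: es => (if cur = [] then [] else [cur]) ++ pvWords [] es

def pvToEv (seps : List Char) (c : Char) : Option Char :=
  if c ∈ seps ∨ c = '\n' then none else some c

-- A's final flush of the loop state.
def pvAFinal (st : List (List Char) × List Char × Bool) : List (List Char) :=
  if st.2.1 ≠ [] then st.1 ++ [st.2.1] else st.1

-- A's loop (plus the final flush) computes pvWords of its event stream.
theorem pvA_words (seps : List Char) (text : List Char) :
    ∀ (cuv : List (List Char)) (cur : List Char) (q : Bool),
    pvAFinal (pvALoop seps (cuv, cur, q) text) = cuv ++ pvWords cur (pvEv seps text q) := by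
  induction text with
  | nil =>
      intro cuv cur q
      simp only [pvALoop, pvEv, pvWords, pvAFinal]
      by_cases h : cur = [] <;> simp [h]
  | cons c t ih =>
      intro cuv cur q
      simp only [pvALoop, pvEv]
      by_cases hq : c = '"'
      · rw [if_pos hq, if_pos hq]
        exact ih cuv cur (!q)
      · rw [if_neg hq, if_neg hq]
        cases q with
        | false =>
            rw [if_neg (by simp : ¬ (false = true))]
            by_cases hk : c ∈ seps ∨ c = '\n'
            · have hcond : ¬ (¬ false = true ∧ c ∉ seps ∧ c ≠ '\n') := by
                rcases hk with hk | hk <;> simp [hk]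
              rw [if_neg hcond, if_pos hk]
              rw [ih (if cur ≠ [] then cuv ++ [cur] else cuv) [] false]
              simp only [pvWords]
              by_cases h : cur = [] <;> simp [h]
            · have hk' : c ∉ seps ∧ c ≠ '\n' := by tauto
              have hcond : (¬ false = true ∧ c ∉ seps ∧ c ≠ '\n') := by simp [hk'.1, hk'.2]
              rw [if_pos hcond, if_neg hk]
              rw [ih cuv (cur ++ [c]) false]
              simp only [pvWords]
        | true =>
            rw [if_pos (rfl : true = true)]
            have hcond : ¬ (¬ true = true ∧ c ∉ seps ∧ c ≠ '\n') := by simp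
            rw [if_neg hcond]
            rw [ih (if cur ≠ [] then cuv ++ [cur] else cuv) [] true]
            simp only [pvWords]
            by_cases h : cur = [] <;> simp [h]

-- Splitting on '\n' and dropping empty pieces computes pvWords of the newline-event stream.
theorem pvSplit_words (t : List Char) :
    ∀ cur : List Char,
    (((t.splitOn '\n').modifyHead (cur ++ ·)).filter (· ≠ []))
      = pvWords cur (t.map (fun c => if c = '\n' then none else some c)) := by
  induction t with
  | nil =>
      intro cur
      simp only [List.splitOn, List.splitOnP_nil, List.modifyHead, List.map, pvWords]
      by_cases h : cur = [] <;> simp [h]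
  | cons c t ih =>
      intro cur
      by_cases hc : c = '\n'
      · have hbeq : (c == '\n') = true := by simpa using hc
        simp only [List.splitOn, List.splitOnP_cons, hbeq, List.map]
        rw [if_pos trivial, ← List.splitOn]
        rw [List.modifyHead_cons, List.append_nil, List.filter_cons, if_pos hc]
        simp only [pvWords]
        have h0 := ih []
        have hmh : ∀ (l : List (List Char)), l.modifyHead (([] : List Char) ++ ·) = l := by
          intro l; cases l <;> simp
        rw [hmh] at h0
        rw [← h0]
        by_cases h : cur = [] <;> simp [h]
      · have hbeq : (c == '\n') = false := by simpa using hc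
        simp only [List.splitOn, List.splitOnP_cons, hbeq, if_neg (by simp : ¬ (false = true)), List.map]
        rw [← List.splitOn]
        rw [List.modifyHead_modifyHead]
        rw [if_neg hc]
        simp only [pvWords]
        have : ((cur ++ ·) ∘ List.cons c) = ((cur ++ [c]) ++ ·) := by
          funext x; simp
        rw [this]
        exact ih (cur ++ [c])

-- pvWords only looks at its accumulator through the first event (helper for the bridge).
theorem pvWords_cong (cur : List Char) (e : Option Char) (l₁ l₂ : List (Option Char))
    (h : ∀ cur', pvWords cur' l₁ = pvWords cur' l₂) :
    pvWords cur (e :: l₁) = pvWords cur (e :: l₂) := by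
  cases e with
  | none => simp only [pvWords, h []]
  | some c => simp only [pvWords, h (cur ++ [c])]

-- Main bridge: the FSM's event stream and B's split-on-'"' reconstruction produce the same words.
theorem pvEv_bridge (seps : List Char) (text : List Char) :
    ∀ (cur : List Char) (q : Bool),
    pvWords cur (pvEv seps text q)
      = pvWords cur (((pvBChunks (text.splitOn '"') (!q)).map (pvToEv seps))) := by
  induction text with
  | nil =>
      intro cur q
      simp only [pvEv, List.splitOn, List.splitOnP_nil]
      cases q <;> simp [pvBChunks]
  | cons c t ih =>
      intro cur q
      by_cases hc : c = '"'
      · have hbeq : (c == '"') = true := by simpa using hc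
        simp only [pvEv, List.splitOn, List.splitOnP_cons, hbeq]
        rw [if_pos hc, ← List.splitOn]
        rw [ih cur (!q)]
        cases q <;> simp [pvBChunks]
      · have hbeq : (c == '"') = false := by simpa using hc
        obtain ⟨p, rest, hsplit⟩ : ∃ p rest, t.splitOn '"' = p :: rest := by
          rcases hx : t.splitOn '"' with _ | ⟨p, rest⟩
          · exact absurd hx (List.splitOnP_ne_nil _ _)
          · exact ⟨p, rest, rfl⟩
        simp only [pvEv, List.splitOn, List.splitOnP_cons, hbeq,
          if_neg (by simp : ¬ (false = true))]
        rw [if_neg hc, ← List.splitOn, hsplit]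
        simp only [List.modifyHead]
        cases q with
        | false =>
            -- outside quotes: c becomes the event pvToEv seps c
            rw [if_neg (by simp : ¬ (false = true))]
            simp only [Bool.not_false, pvBChunks, List.cons_append, List.map_cons]
            have hrec : ∀ cur', pvWords cur' (pvEv seps t false)
                = pvWords cur' ((p ++ pvBChunks rest false).map (pvToEv seps)) := by
              intro cur'
              have h0 := ih cur' false
              rw [hsplit] at h0
              simpa [pvBChunks] using h0
            exact pvWords_cong cur (pvToEv seps c) _ _ hrec
        | true =>
            -- inside quotes: c breaks the word; B emits one '\n' for the whole nonempty part
            rw [if_pos (rfl : true = true)]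
            simp only [Bool.not_true, pvBChunks]
            rw [if_pos (by simp : (c :: p) ≠ [])]
            have hrec := ih ([] : List Char) true
            rw [hsplit] at hrec
            simp only [Bool.not_true, pvBChunks] at hrec
            have hnl : pvToEv seps '\n' = none := by simp [pvToEv]
            simp only [List.cons_append, List.nil_append, List.map_cons, hnl, pvWords]
            rw [hrec]
            by_cases hp : p = []
            · simp [hp]
            · rw [if_pos hp]
              simp only [List.cons_append, List.nil_append, List.map_cons, hnl, pvWords]
              simp

-- B's seen-set dedup (seen = out as lists) equals A's `x not in cuv_unice` fold on the
-- nonempty tokens.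
theorem pvDedup_bridge (toks : List (List Char)) :
    ∀ out : List (List Char),
    pvBDedup toks out out
      = (toks.filter (· ≠ [])).foldl (fun acc x => if x ∈ acc then acc else acc ++ [x]) out := by
  induction toks with
  | nil => intro out; simp [pvBDedup]
  | cons t ts ih =>
      intro out
      by_cases ht : t = []
      · simp [pvBDedup, ht, ih]
      · rw [List.filter_cons, if_pos (by simpa using ht)]
        by_cases hm : t ∈ out
        · have hcont : PySem.Set.contains out t = true := by
            simpa using (PySem.Set.contains_iff out t).2 hm
          simp only [pvBDedup, hcont]
          rw [if_neg (by simp)]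
          simp only [List.foldl_cons, if_pos hm]
          exact ih out
        · have hcont : PySem.Set.contains out t = false := by
            cases h : PySem.Set.contains out t
            · rfl
            · exact absurd ((PySem.Set.contains_iff out t).1 h) hm
          simp only [pvBDedup]
          rw [if_pos ⟨ht, hcont⟩]
          have hadd : PySem.Set.add out t = out ++ [t] := by
            simp [PySem.Set.add, hm]
          rw [hadd, List.foldl_cons, if_neg hm]
          exact ih (out ++ [t])

-- Composing the translate step with the newline test gives pvToEv.
theorem pvTranslate_ev (seps : List Char) (s : List Char) :
    (s.map (fun c => if c ∈ seps then '\n' else c)).map (fun c => if c = '\n' then none else some c)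
      = s.map (pvToEv seps) := by
  rw [List.map_map]
  apply List.map_congr_left
  intro c _
  by_cases h : c ∈ seps
  · simp [pvToEv, h]
  · by_cases hn : c = '\n' <;> simp [pvToEv, h, hn]

-- ===== VERDICT (by name: the statement is the Claim_ definition above) =====
theorem extrage_cuvinte_spec : Claim_equal_extrage_cuvinte := by
  intro text separatori _
  show ((pvAFinal (pvALoop separatori.toList ([], [], false) text.toList)).foldl
          (fun acc x => if x ∈ acc then acc else acc ++ [x]) []).map String.ofList
      = (pvBDedup (((pvBChunks (text.toList.splitOn '"') true).map
            (fun c => if c ∈ separatori.toList then '\n' else c)).splitOn '\n') [] []).map String.ofList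
  congr 1
  rw [pvDedup_bridge _ []]
  congr 1
  have hA := pvA_words separatori.toList text.toList [] [] false
  simp only [List.nil_append] at hA
  rw [hA]
  rw [pvEv_bridge separatori.toList text.toList [] false]
  simp only [Bool.not_false]
  have hS := pvSplit_words
    ((pvBChunks (text.toList.splitOn '"') true).map
      (fun c => if c ∈ separatori.toList then '\n' else c)) []
  have hmh : ∀ (l : List (List Char)), l.modifyHead (([] : List Char) ++ ·) = l := by
    intro l; cases l <;> simp
  rw [hmh] at hS
  rw [pvTranslate_ev] at hS
  exact hS.symm
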